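-- pv_equiv track=rewrite | github.com/TLMn00bs/advent-of-code | vLabayen/2022/d7/domain.py | split_commands_into_blocks
-- ===== SOURCE A (Python) =====
-- import typing
--
-- def split_commands_into_blocks(lines: typing.List[str]) -> typing.List[typing.List[str]]:
-- 	''' Split input lines in blocks of commands & their output
--
-- 	>>> split_commands_into_blocks([
-- 	...		'$ cd /',
-- 	...		'$ ls',
-- 	...		'dir a',
-- 	...		'14848514 b.txt',
-- 	...		'8504156 c.dat',
-- 	...		'dir d',
-- 	...		'$ cd a',
-- 	...		'$ ls',
-- 	...		'dir e',
-- 	...		'29116 f',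
-- 	...		'2557 g',
-- 	...		'62596 h.lst',
-- 	...		'$ cd e',
-- 	...		'$ ls',
-- 	...		'584 i',
-- 	...		'$ cd ..',
-- 	...		'$ cd ..',
-- 	...		'$ cd d',
-- 	...		'$ ls',
-- 	...		'4060174 j',
-- 	...		'8033020 d.log',
-- 	...		'5626152 d.ext',
-- 	...		'7214296 k',
-- 	...	])
-- 	[['$ cd /', '$ ls', 'dir a', '14848514 b.txt', '8504156 c.dat', 'dir d'], ['$ cd a', '$ ls', 'dir e', '29116 f', '2557 g', '62596 h.lst'], ['$ cd e', '$ ls', '584 i'], ['$ cd ..', '$ cd ..', '$ cd d', '$ ls', '4060174 j', '8033020 d.log', '5626152 d.ext', '7214296 k']]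
-- 	'''
-- 	blocks = []
-- 	current_block = []
-- 	prev_line_was_command = True
-- 	for line in lines:
-- 		is_command = line.startswith('$')
--
-- 		if not prev_line_was_command and is_command:
-- 			blocks.append(current_block)
-- 			current_block = []
--
-- 		current_block.append(line)
-- 		prev_line_was_command = is_command
--
-- 	if len(current_block) > 0: blocks.append(current_block)
-- 	return blocks
-- ===== SOURCE B (Python) =====
-- import typing
--
-- def split_commands_into_blocks(lines: typing.List[str]) -> typing.List[typing.List[str]]:
-- 	'''Build the blocks back-to-front: walk the lines in reverse and either start a
-- 	new block or extend the current one; blocks (and the lines inside each block) are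
-- 	kept in reversed order so every update is an O(1) append, then un-reversed at the end.'''
-- 	rev_blocks = []
-- 	for line in reversed(lines):
-- 		if not rev_blocks or (rev_blocks[-1][-1].startswith('$') and not line.startswith('$')):
-- 			rev_blocks.append([line])
-- 		else:
-- 			rev_blocks[-1].append(line)
-- 	return [block[::-1] for block in reversed(rev_blocks)]
-- ===== Notes on version B (the rewrite author's own statement) =====
-- stated objective: alternative
-- what changed: B builds the blocks back-to-front: it walks the lines in reverse and either prepends a new block or prepends the line into the current front block, replacing A's forward accumulator with a current_block and a prev-line-was-command flag.
import Mathlib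
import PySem

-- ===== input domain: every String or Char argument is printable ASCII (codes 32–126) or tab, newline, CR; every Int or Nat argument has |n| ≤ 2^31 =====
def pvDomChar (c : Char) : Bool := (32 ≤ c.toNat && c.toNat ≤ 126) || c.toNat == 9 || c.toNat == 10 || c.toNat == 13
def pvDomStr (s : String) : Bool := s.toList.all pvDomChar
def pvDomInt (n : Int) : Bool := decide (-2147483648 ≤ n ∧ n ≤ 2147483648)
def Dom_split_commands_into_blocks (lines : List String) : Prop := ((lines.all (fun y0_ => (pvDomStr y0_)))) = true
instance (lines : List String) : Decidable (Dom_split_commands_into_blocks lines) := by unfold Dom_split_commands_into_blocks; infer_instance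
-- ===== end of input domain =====

-- B builds the same blocks back-to-front (reverse walk over the lines, appends on
-- reversed blocks, un-reversed at the end) instead of A's forward accumulator with a
-- prev-line-was-command flag; same O(n) cost, different decomposition.

-- ===== PORT A =====
-- A's for-loop over lines with state (blocks, current_block, prev_line_was_command)
def pvLoopA : List (List String) → List String → Bool → List String → List (List String)
  | blocks, cur, _, [] => if cur.length > 0 then blocks ++ [cur] else blocks
  | blocks, cur, prev, l :: ls =>
      let b := PySem.Str.startswith l "$"
      if !prev && b then pvLoopA (blocks ++ [cur]) [l] b ls
      else pvLoopA blocks (cur ++ [l]) b ls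

def split_commands_into_blocks (lines : List String) : List (List String) :=
  pvLoopA [] [] true lines

-- ===== PORT B =====
-- one iteration of B's loop over reversed(lines): rev_blocks[-1] is getLastD,
-- rev_blocks.append is ++ [..], mutating rev_blocks[-1] is dropLast ++ [.. ++ [line]]
def pvStepBrev (rbs : List (List String)) (line : String) : List (List String) :=
  if rbs.isEmpty
      || (PySem.Str.startswith ((rbs.getLastD []).getLastD "") "$"
          && !(PySem.Str.startswith line "$")) then
    rbs ++ [[line]]
  else
    rbs.dropLast ++ [(rbs.getLastD []) ++ [line]]

-- 'for line in reversed(lines)' = a left fold over lines.reverse;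
-- block[::-1] and reversed(rev_blocks) are ported as List.reverse
def split_commands_into_blocks_alt (lines : List String) : List (List String) :=
  let revBlocks := lines.reverse.foldl pvStepBrev []
  revBlocks.reverse.map (fun block => block.reverse)

-- ===== PRECONDITION & SPEC =====
def Spec_split_commands_into_blocks (lines : List String) (out : List (List String)) : Prop := out = split_commands_into_blocks_alt lines
instance (lines : List String) (out : List (List String)) : Decidable (Spec_split_commands_into_blocks lines out) := by unfold Spec_split_commands_into_blocks; infer_instance

-- ===== CLAIM (what is proved, stated in full; the proofs are below) =====
def Claim_equal_split_commands_into_blocks : Prop := ∀ (lines : List String), Dom_split_commands_into_blocks lines → Spec_split_commands_into_blocks lines (split_commands_into_blocks lines)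

-- ===== LEMMAS AND PROOFS =====

-- proof-side view of one B step on the un-reversed blocks (cons at the front)
def pvStepB (line : String) (blocks : List (List String)) : List (List String) :=
  match blocks with
  | [] => [[line]]
  | blk :: rest =>
      if PySem.Str.startswith (blk.headD "") "$" && !(PySem.Str.startswith line "$") then
        [line] :: blk :: rest
      else (line :: blk) :: rest

-- the double reversal B maintains
def pvRevAll (bs : List (List String)) : List (List String) :=
  (bs.map List.reverse).reverse

theorem pvStepBrev_eq (l : String) (bs : List (List String)) :
    pvStepBrev (pvRevAll bs) l = pvRevAll (pvStepB l bs) := by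
  cases bs with
  | nil => simp [pvRevAll, pvStepBrev, pvStepB]
  | cons blk rest =>
      have hlast : (blk.reverse).getLastD "" = blk.headD "" := by
        cases blk with
        | nil => simp
        | cons a as =>
            simp [List.getLastD_eq_getLast?, List.getLast?_reverse]
      simp [pvRevAll, pvStepBrev, pvStepB, hlast]
      split_ifs <;> simp

theorem pvFoldl_rev (ls : List String) :
    ls.reverse.foldl pvStepBrev [] = pvRevAll (List.foldr pvStepB [] ls) := by
  induction ls with
  | nil => simp [pvRevAll]
  | cons l ls ih =>
      simp only [List.reverse_cons, List.foldl_append, List.foldl_cons, List.foldl_nil, ih,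
        List.foldr]
      exact pvStepBrev_eq l (List.foldr pvStepB [] ls)

theorem pvRevAll_invol (bs : List (List String)) : pvRevAll (pvRevAll bs) = bs := by
  simp [pvRevAll, List.map_reverse, List.map_map, Function.comp_def]

-- B's port computes exactly the foldr view
theorem pvAlt_eq_foldr (lines : List String) :
    split_commands_into_blocks_alt lines = List.foldr pvStepB [] lines := by
  unfold split_commands_into_blocks_alt
  rw [pvFoldl_rev]
  have : (pvRevAll (List.foldr pvStepB [] lines)).reverse.map (fun block => block.reverse)
      = pvRevAll (pvRevAll (List.foldr pvStepB [] lines)) := by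
    simp [pvRevAll, List.map_reverse]
  rw [this, pvRevAll_invol]

-- how a finished current block 'cur' (whose last line has flag 'prev') attaches in front
-- of the blocks of the remaining lines
def pvAttach (prev : Bool) (cur : List String) (gs : List (List String)) : List (List String) :=
  match gs with
  | [] => [cur]
  | g :: rest =>
      if PySem.Str.startswith (g.headD "") "$" && !prev then cur :: g :: rest
      else (cur ++ g) :: rest

-- the first block produced by the foldr view on a nonempty list starts with its first line
theorem pvFoldr_head (l : String) (ls : List String) :
    ∃ t rest, List.foldr pvStepB [] (l :: ls) = (l :: t) :: rest := by
  simp only [List.foldr]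
  cases List.foldr pvStepB [] ls with
  | nil => exact ⟨[], [], rfl⟩
  | cons blk rest =>
      simp only [pvStepB]
      split
      · exact ⟨[], blk :: rest, rfl⟩
      · exact ⟨blk, rest, rfl⟩

-- loop invariant: with a nonempty current block cur ++ [l] whose last flag is startswith l "$",
-- A's loop appends cur ++ [l] attached in front of the foldr view of the remaining lines
theorem pvLoopA_inv (ls : List String) :
    ∀ (blocks : List (List String)) (cur : List String) (l : String),
      pvLoopA blocks (cur ++ [l]) (PySem.Str.startswith l "$") ls
        = blocks ++ pvAttach (PySem.Str.startswith l "$") (cur ++ [l]) (List.foldr pvStepB [] ls) := by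
  induction ls with
  | nil =>
      intro blocks cur l
      simp [pvLoopA, pvAttach]
  | cons m ms ih =>
      intro blocks cur l
      have hstep :
          pvLoopA blocks (cur ++ [l]) (PySem.Str.startswith l "$") (m :: ms)
            = if !(PySem.Str.startswith l "$") && PySem.Str.startswith m "$" then
                pvLoopA (blocks ++ [cur ++ [l]]) [m] (PySem.Str.startswith m "$") ms
              else
                pvLoopA blocks ((cur ++ [l]) ++ [m]) (PySem.Str.startswith m "$") ms := rfl
      rw [hstep]
      have ih1 := ih (blocks ++ [cur ++ [l]]) [] m
      have ih2 := ih blocks (cur ++ [l]) m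
      simp only [List.nil_append] at ih1
      cases ms with
      | nil =>
          simp only [List.foldr] at ih1 ih2 ⊢
          cases hl : PySem.Str.startswith l "$" <;> cases hm : PySem.Str.startswith m "$" <;>
            simp at hl hm <;>
            simp [hl, hm] at ih1 ih2 ⊢ <;>
            simp [ih1, ih2, pvStepB, pvAttach, hl, hm, List.append_assoc]
      | cons m' ms' =>
          obtain ⟨t, rest, hG⟩ := pvFoldr_head m' ms'
          have hfold : List.foldr pvStepB [] (m :: m' :: ms') = pvStepB m ((m' :: t) :: rest) := by
            simp only [List.foldr] at hG ⊢; rw [hG]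
          rw [hfold]
          rw [show List.foldr pvStepB [] (m' :: ms') = (m' :: t) :: rest from hG] at ih1 ih2
          cases hl : PySem.Str.startswith l "$" <;> cases hm : PySem.Str.startswith m "$" <;>
            cases hm' : PySem.Str.startswith m' "$" <;>
            simp at hl hm hm' <;>
            simp [hl, hm, hm'] at ih1 ih2 ⊢ <;>
            simp [ih1, ih2, pvStepB, pvAttach, hl, hm, hm', List.append_assoc]

-- ===== VERDICT (by name: the statement is the Claim_ definition above) =====
theorem split_commands_into_blocks_spec : Claim_equal_split_commands_into_blocks := by
  intro lines _
  unfold Spec_split_commands_into_blocks split_commands_into_blocks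
  rw [pvAlt_eq_foldr]
  cases lines with
  | nil => rfl
  | cons l ls =>
      have h1 : pvLoopA [] [] true (l :: ls)
          = pvLoopA [] ([] ++ [l]) (PySem.Str.startswith l "$") ls := by
        simp [pvLoopA]
      rw [h1, pvLoopA_inv ls [] [] l]
      simp only [List.nil_append]
      cases ls with
      | nil => simp [pvAttach, pvStepB, List.foldr]
      | cons m ms =>
          obtain ⟨t, rest, hG⟩ := pvFoldr_head m ms
          simp only [List.foldr] at hG ⊢
          rw [hG]
          cases hl : PySem.Str.startswith l "$" <;> cases hm : PySem.Str.startswith m "$" <;>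
            simp at hl hm <;>
            simp [pvAttach, pvStepB, hl, hm]
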